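-- pv_equiv track=rewrite | github.com/REPANAJYOTHIPRAKASH629/Python-for-Data-Science | 11-04-2023.py | alterseq
-- ===== SOURCE A (Python) =====
-- def alterseq(n):
--     a = 0
--     b = 0
--     for i in range(1,n):
--         if i%2==0:
--             a+=i**3
--         else:
--             b+=i**3
--     return b-a
-- ===== SOURCE B (Python) =====
-- def alterseq(n):
--     k = n - 1
--     if k <= 0:
--         return 0
--     p = (k + 1) // 2          # number of odd values in 1..k
--     q = k // 2                # number of even values in 1..k
--     # sum of first p odd cubes = p^2*(2p^2-1); sum of first q even cubes = 2*q^2*(q+1)^2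
--     return p * p * (2 * p * p - 1) - 2 * q * q * (q + 1) * (q + 1)
-- ===== Notes on version B (the rewrite author's own statement) =====
-- stated objective: faster
-- what changed: Replaces the O(n) loop accumulating odd and even cubes with closed-form formulas for the sum of the first p odd cubes and first q even cubes.
import Mathlib
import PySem

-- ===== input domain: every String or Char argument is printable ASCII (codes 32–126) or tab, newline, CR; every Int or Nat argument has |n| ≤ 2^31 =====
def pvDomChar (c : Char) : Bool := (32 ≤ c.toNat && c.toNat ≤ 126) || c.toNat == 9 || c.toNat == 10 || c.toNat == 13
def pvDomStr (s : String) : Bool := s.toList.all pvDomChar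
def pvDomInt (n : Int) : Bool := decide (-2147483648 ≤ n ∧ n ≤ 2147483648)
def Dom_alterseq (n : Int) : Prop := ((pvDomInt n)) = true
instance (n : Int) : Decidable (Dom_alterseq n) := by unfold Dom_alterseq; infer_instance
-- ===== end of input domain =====

-- B replaces A's O(n) accumulation loop with closed-form formulas for the sums of odd/even cubes (objective: faster).

-- ===== PORT A =====
def alterseq (n : Int) : Int :=
  let ab := (PySem.List.pyRange 1 n 1).foldl
    (fun (ab : Int × Int) i =>
      if PySem.Int.mod i 2 == 0 then (ab.1 + i ^ 3, ab.2) else (ab.1, ab.2 + i ^ 3))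
    (0, 0)
  ab.2 - ab.1

-- ===== PORT B =====
def alterseq_alt (n : Int) : Int :=
  let k := n - 1
  if k ≤ 0 then 0
  else
    let p := PySem.Int.floordiv (k + 1) 2
    let q := PySem.Int.floordiv k 2
    p * p * (2 * p * p - 1) - 2 * q * q * (q + 1) * (q + 1)

-- ===== PRECONDITION & SPEC =====
def Spec_alterseq (n : Int) (out : Int) : Prop := out = alterseq_alt n
instance (n : Int) (out : Int) : Decidable (Spec_alterseq n out) := by unfold Spec_alterseq; infer_instance

-- ===== CLAIM (what is proved, stated in full; the proofs are below) =====
def Claim_equal_alterseq : Prop := ∀ (n : Int), Dom_alterseq n → Spec_alterseq n (alterseq n)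

-- ===== LEMMAS AND PROOFS =====

-- A's loop step, named for the proofs.
def pvStep (ab : Int × Int) (i : Int) : Int × Int :=
  if PySem.Int.mod i 2 == 0 then (ab.1 + i ^ 3, ab.2) else (ab.1, ab.2 + i ^ 3)

lemma pvStep_even (ab : Int × Int) (i : Int) (h : i % 2 = 0) :
    pvStep ab i = (ab.1 + i ^ 3, ab.2) := by
  simp [pvStep, h]

lemma pvStep_odd (ab : Int × Int) (i : Int) (h : i % 2 = 1) :
    pvStep ab i = (ab.1, ab.2 + i ^ 3) := by
  simp [pvStep, h]

-- Closed form of A's fold over range(1, 1+m).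
lemma fold_closed (m : Nat) :
    (PySem.List.pyRange 1 (1 + (m : Int)) 1).foldl pvStep (0, 0)
      = (2 * ((m / 2 : Nat) : Int) ^ 2 * (((m / 2 : Nat) : Int) + 1) ^ 2,
         (((m + 1) / 2 : Nat) : Int) ^ 2 * (2 * (((m + 1) / 2 : Nat) : Int) ^ 2 - 1)) := by
  induction m with
  | zero =>
      rw [PySem.List.pyRange_one_eq_nil (by omega)]
      decide
  | succ m ih =>
      have hb : (1 : Int) + ((m + 1 : Nat) : Int) = (1 + (m : Int)) + 1 := by push_cast; ring
      rw [hb, PySem.List.pyRange_one_succ_right (by omega), List.foldl_append, ih]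
      simp only [List.foldl_cons, List.foldl_nil]
      rcases Nat.even_or_odd m with ⟨t, ht⟩ | ⟨t, ht⟩
      · -- m = 2t: new element 1+m is odd
        subst ht
        rw [pvStep_odd _ _ (by omega)]
        have h1 : (t + t) / 2 = t := by omega
        have h2 : (t + t + 1) / 2 = t := by omega
        have h3 : (t + t + 1 + 1) / 2 = t + 1 := by omega
        rw [h1, h2, h3]
        simp only [Prod.mk.injEq]
        push_cast
        constructor <;> first | trivial | ring
      · -- m = 2t+1: new element 1+m is even
        subst ht
        rw [pvStep_even _ _ (by omega)]
        have h1 : (2 * t + 1) / 2 = t := by omega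
        have h2 : (2 * t + 1 + 1) / 2 = t + 1 := by omega
        have h3 : (2 * t + 1 + 1 + 1) / 2 = t + 1 := by omega
        rw [h1, h2, h3]
        simp only [Prod.mk.injEq]
        push_cast
        constructor <;> first | trivial | ring

-- ===== VERDICT (by name: the statement is the Claim_ definition above) =====
theorem alterseq_spec : Claim_equal_alterseq := by
  intro n _
  unfold Spec_alterseq alterseq alterseq_alt
  by_cases h : n - 1 ≤ 0
  · rw [PySem.List.pyRange_one_eq_nil (by omega)]
    simp [h]
  · have hm : n = 1 + ((n - 1).toNat : Int) := by omega
    set m := (n - 1).toNat with hmdef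
    rw [if_neg h]
    show ((PySem.List.pyRange 1 n 1).foldl pvStep (0, 0)).2
        - ((PySem.List.pyRange 1 n 1).foldl pvStep (0, 0)).1 = _
    rw [hm, fold_closed m]
    have hp : PySem.Int.floordiv (1 + (m : Int) - 1 + 1) 2 = (((m + 1) / 2 : Nat) : Int) := by
      have : (1 : Int) + (m : Int) - 1 + 1 = ((m + 1 : Nat) : Int) := by push_cast; ring
      rw [this]; exact_mod_cast PySem.Int.floordiv_natCast (m + 1) 2
    have hq : PySem.Int.floordiv (1 + (m : Int) - 1) 2 = ((m / 2 : Nat) : Int) := by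
      have : (1 : Int) + (m : Int) - 1 = ((m : Nat) : Int) := by omega
      rw [this]; exact_mod_cast PySem.Int.floordiv_natCast m 2
    rw [hp, hq]
    ring
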